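-- pv_equiv track=rewrite | github.com/FLY-AI-LOGITECH/minminminsoo | Week3/K번째수.py | solution
-- ===== SOURCE A (Python) =====
-- def solution(array, commands):
--     answer = []
--     for i in commands:
--         start,end,num = i
--         tmp = array[start-1:end]
--         tmp.sort()
--         answer.append(tmp[num-1])
--     return answer
-- ===== SOURCE B (Python) =====
-- def solution(array, commands):
--     res = []
--     for start, end, num in commands:
--         sub = array[start - 1:end]
--         k = num - 1
--         # iterative quickselect: k-th smallest of sub
--         while True:
--             pivot = sub[0]
--             less = [x for x in sub if x < pivot]
--             if k < len(less):
--                 sub = less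
--                 continue
--             eq = len([x for x in sub if x == pivot])
--             if k < len(less) + eq:
--                 res.append(pivot)
--                 break
--             k -= len(less) + eq
--             sub = [x for x in sub if x > pivot]
--     return res
-- ===== Notes on version B (the rewrite author's own statement) =====
-- stated objective: alternative
-- what changed: Each command's answer is computed by an iterative quickselect (three-way partition around the head pivot, descending into the side holding the target index) on the copied slice instead of fully sorting the slice and indexing it; Pre_ excludes commands that are not triples (A raises ValueError) and commands with num outside 1..len(slice): for num > len(slice) A raises IndexError, and for num < 1 A returns a value only through Python's negative indexing on a 1-indexed command while B's quickselect raises IndexError there.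
-- outside the precondition, e.g. on solution([1, 2, 3], [[1, 3, 0]]): A returns [3], B raises IndexError; on solution([1, 2, 3], [[1, 3, 5]]): A raises IndexError, B raises IndexError
import Mathlib
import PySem

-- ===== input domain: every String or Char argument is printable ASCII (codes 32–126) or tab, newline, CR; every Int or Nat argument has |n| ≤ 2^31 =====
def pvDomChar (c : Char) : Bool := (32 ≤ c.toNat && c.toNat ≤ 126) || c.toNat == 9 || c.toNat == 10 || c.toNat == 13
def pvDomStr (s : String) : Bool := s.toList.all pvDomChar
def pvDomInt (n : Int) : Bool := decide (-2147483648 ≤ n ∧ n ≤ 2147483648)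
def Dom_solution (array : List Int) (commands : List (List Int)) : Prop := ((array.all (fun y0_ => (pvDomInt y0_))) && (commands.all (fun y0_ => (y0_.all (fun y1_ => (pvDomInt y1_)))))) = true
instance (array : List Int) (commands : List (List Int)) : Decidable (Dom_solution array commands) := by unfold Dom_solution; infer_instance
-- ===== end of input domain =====

-- B replaces per-command sort-then-index by an iterative quickselect on the copied slice (alternative algorithm, same results on Pre_).


-- ===== PORT A =====
-- for each command: tmp = array[start-1:end]; tmp.sort(); answer.append(tmp[num-1]).
-- Commands not of length 3 (unpacking ValueError) are excluded by Pre_solution,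
-- as is any out-of-range tmp[num-1]; the port falls through / uses a default only there.
def solution (array : List Int) (commands : List (List Int)) : List Int :=
  commands.foldl (fun answer i =>
    match i with
    | [start, end_, num] =>
      let tmp := PySem.List.sorted (PySem.List.slice array (some (start - 1)) (some end_)) (fun x => x) false
      answer ++ [PySem.List.pyGetD tmp (num - 1) 0]
    | _ => answer) []

-- ===== PORT B =====
-- the while-loop of Source B: iterative quickselect; fuel (= current list length) bounds the iterations
def qselLoop : Nat → List Int → Int → Int
  | 0, _, _ => 0
  | fuel + 1, sub, k =>
    match sub with
    | [] => 0
    | pivot :: _ =>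
      let less := sub.filter (fun x => x < pivot)
      if k < (less.length : Int) then qselLoop fuel less k
      else
        let eq := (sub.filter (fun x => x == pivot)).length
        if k < ((less.length : Int) + (eq : Int)) then pivot
        else qselLoop fuel (sub.filter (fun x => pivot < x)) (k - (less.length : Int) - (eq : Int))

def solution_alt (array : List Int) (commands : List (List Int)) : List Int :=
  commands.foldl (fun res c =>
    if c.length = 3 then
      let start := c.getD 0 0
      let end_ := c.getD 1 0
      let num := c.getD 2 0
      let sub := PySem.List.slice array (some (start - 1)) (some end_)
      res ++ [qselLoop sub.length sub (num - 1)]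
    else res) []

-- ===== PRECONDITION & SPEC =====
-- Pre_ admits exactly the 3-entry commands with 1 ≤ num ≤ len(slice): commands that are not
-- triples make A raise ValueError on unpacking, num > len(slice) makes A raise IndexError, and
-- for num < 1 A returns a value only through Python's negative indexing on a 1-indexed command
-- while B's quickselect raises IndexError there.
def Pre_solution (array : List Int) (commands : List (List Int)) : Prop :=
  ∀ c ∈ commands, c.length = 3 ∧
    0 ≤ c.getD 2 0 - 1 ∧
    c.getD 2 0 - 1 < ((PySem.List.slice array (some (c.getD 0 0 - 1)) (some (c.getD 1 0))).length : Int)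
instance (array : List Int) (commands : List (List Int)) : Decidable (Pre_solution array commands) := by unfold Pre_solution; infer_instance

def pvWitness_solution : List Int × List (List Int) := ([5, 3, 1, 4, 2], [[1, 5, 3], [2, 4, 1]])

def Spec_solution (array : List Int) (commands : List (List Int)) (out : List Int) : Prop := out = solution_alt array commands
instance (array : List Int) (commands : List (List Int)) (out : List Int) : Decidable (Spec_solution array commands out) := by unfold Spec_solution; infer_instance

-- ===== CLAIM (what is proved, stated in full; the proofs are below) =====
def Claim_equal_solution : Prop := ∀ (array : List Int) (commands : List (List Int)), Dom_solution array commands → Pre_solution array commands → Spec_solution array commands (solution array commands)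

-- ===== LEMMAS AND PROOFS =====

theorem count_filter_zero {q : Int → Bool} {a : Int} (h : ¬ q a = true) (l : List Int) :
    List.count a (l.filter q) = 0 :=
  List.count_eq_zero.2 (fun hm => h (List.of_mem_filter hm))

theorem count_filter_tot {q : Int → Bool} {a : Int} (h : q a = true) (l : List Int) :
    List.count a (l.filter q) = List.count a l := by
  induction l with
  | nil => rfl
  | cons b t ih =>
    by_cases hb : q b = true
    · by_cases hab : a = b <;> simp [hb, List.count_cons, ih, hab]
    · have hba : ¬ b = a := fun he => hb (he.symm ▸ h)
      simp [hb, ih, hba]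

-- three-way partition around a pivot is a permutation of the list
theorem perm_filter3 (p : Int) (l : List Int) :
    (l.filter (fun x => x < p) ++ (l.filter (fun x => x == p) ++ l.filter (fun x => p < x))).Perm l := by
  rw [List.perm_iff_count]
  intro a
  simp only [List.count_append]
  rcases lt_trichotomy a p with h | h | h
  · rw [count_filter_tot (by simpa using h), count_filter_zero (by simpa using (by omega : ¬ a = p)),
      count_filter_zero (by simpa using (by omega : ¬ p < a))]
    omega
  · rw [count_filter_zero (by simpa using (by omega : ¬ a < p)), count_filter_tot (by simpa using h),
      count_filter_zero (by simpa using (by omega : ¬ p < a))]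
    omega
  · rw [count_filter_zero (by simpa using (by omega : ¬ a < p)),
      count_filter_zero (by simpa using (by omega : ¬ a = p)), count_filter_tot (by simpa using h)]
    omega

-- sorted(sub) is exactly sorted(less) ++ equals ++ sorted(greater)
theorem sorted_partition (p : Int) (l : List Int) :
    PySem.List.sorted l (fun x => x) false =
      PySem.List.sorted (l.filter (fun x => x < p)) (fun x => x) false ++
      (l.filter (fun x => x == p) ++
       PySem.List.sorted (l.filter (fun x => p < x)) (fun x => x) false) := by
  apply PySem.List.sorted_id_eq_of_perm_of_pairwise
  · exact List.Perm.trans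
      (List.Perm.append (PySem.List.sorted_perm _ _ _)
        (List.Perm.append (List.Perm.refl _) (PySem.List.sorted_perm _ _ _)))
      (perm_filter3 p l)
  · have heq : ∀ x ∈ l.filter (fun x => x == p), x = p := by
      intro x hx; simpa using List.of_mem_filter hx
    have hlm : ∀ x ∈ PySem.List.sorted (l.filter (fun x => x < p)) (fun x => x) false, x < p := by
      intro x hx
      simpa using List.of_mem_filter ((PySem.List.mem_sorted _ _ _ _).1 hx)
    have hgm : ∀ x ∈ PySem.List.sorted (l.filter (fun x => p < x)) (fun x => x) false, p < x := by
      intro x hx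
      simpa using List.of_mem_filter ((PySem.List.mem_sorted _ _ _ _).1 hx)
    rw [List.pairwise_append]
    refine ⟨PySem.List.sorted_pairwise _ _, ?_, ?_⟩
    · rw [List.pairwise_append]
      refine ⟨?_, PySem.List.sorted_pairwise _ _, ?_⟩
      · exact List.pairwise_of_forall_mem_list (fun a ha b hb => by rw [heq a ha, heq b hb])
      · intro a ha b hb
        have := heq a ha; have := hgm b hb; omega
    · intro a ha b hb
      rcases List.mem_append.1 hb with hb | hb
      · have := heq b hb; have := hlm a ha; omega
      · have := hlm a ha; have := hgm b hb; omega

-- quickselect computes the k-th element of the sorted list (given enough fuel)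
theorem qselLoop_spec : ∀ (fuel : Nat) (sub : List Int) (k : Nat),
    sub.length ≤ fuel → k < sub.length →
    qselLoop fuel sub (k : Int) = (PySem.List.sorted sub (fun x => x) false).getD k 0 := by
  intro fuel
  induction fuel with
  | zero => intro sub k hf hk; omega
  | succ fuel ih =>
    intro sub k hf hk
    match sub, hk, hf with
    | pivot :: rest, hk, hf =>
      have hL := PySem.List.length_sorted (xs := (pivot :: rest).filter (fun x => x < pivot)) (key := fun x => x) (rev := false)
      have hG := PySem.List.length_sorted (xs := (pivot :: rest).filter (fun x => pivot < x)) (key := fun x => x) (rev := false)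
      have hlen : ((pivot :: rest).filter (fun x => x < pivot)).length +
          (((pivot :: rest).filter (fun x => x == pivot)).length + ((pivot :: rest).filter (fun x => pivot < x)).length) = (pivot :: rest).length := by
        have := (perm_filter3 pivot (pivot :: rest)).length_eq
        simp only [List.length_append] at this
        omega
      have hpivmem : pivot ∈ (pivot :: rest).filter (fun x => x == pivot) :=
        List.mem_filter.2 ⟨by simp, by simp⟩
      have hEpos : 0 < ((pivot :: rest).filter (fun x => x == pivot)).length := List.length_pos_of_mem hpivmem
      simp only [List.length_cons] at hlen hf hk
      rw [sorted_partition pivot (pivot :: rest)]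
      simp only [qselLoop]
      by_cases h1 : (k : Int) < (((pivot :: rest).filter (fun x => x < pivot)).length : Int)
      · have h1' : k < ((pivot :: rest).filter (fun x => x < pivot)).length := by exact_mod_cast h1
        rw [if_pos h1, List.getD_append _ _ _ _ (by omega),
          ih ((pivot :: rest).filter (fun x => x < pivot)) k (by omega) h1']
      · rw [if_neg h1]
        have h1' : ((pivot :: rest).filter (fun x => x < pivot)).length ≤ k := by omega
        by_cases h2 : (k : Int) < (((pivot :: rest).filter (fun x => x < pivot)).length : Int) + (((pivot :: rest).filter (fun x => x == pivot)).length : Int)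
        · have h2' : k < ((pivot :: rest).filter (fun x => x < pivot)).length + ((pivot :: rest).filter (fun x => x == pivot)).length := by
            exact_mod_cast h2
          rw [if_pos h2, List.getD_append_right _ _ _ _ (by omega),
            List.getD_append _ _ _ _ (by omega)]
          have hmem : ((pivot :: rest).filter (fun x => x == pivot)).getD
              (k - (PySem.List.sorted ((pivot :: rest).filter (fun x => x < pivot)) (fun x => x) false).length) 0
              ∈ (pivot :: rest).filter (fun x => x == pivot) := by
            rw [List.getD_eq_getElem _ _ (by omega)]
            exact List.getElem_mem _
          have := List.of_mem_filter hmem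
          simp only [beq_iff_eq] at this
          omega
        · have h2' : ((pivot :: rest).filter (fun x => x < pivot)).length + ((pivot :: rest).filter (fun x => x == pivot)).length ≤ k := by omega
          rw [if_neg h2]
          have hcast : (k : Int) - (((pivot :: rest).filter (fun x => x < pivot)).length : Int) - (((pivot :: rest).filter (fun x => x == pivot)).length : Int)
              = ((k - ((pivot :: rest).filter (fun x => x < pivot)).length - ((pivot :: rest).filter (fun x => x == pivot)).length : Nat) : Int) := by
            omega
          rw [hcast, ih ((pivot :: rest).filter (fun x => pivot < x)) _ (by omega) (by omega),
            List.getD_append_right _ _ _ _ (by omega), List.getD_append_right _ _ _ _ (by omega)]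
          congr 1
          omega

-- one command processed identically by both ports (Pre_: 0 ≤ num-1 < len(slice))
theorem step_eq (array : List Int) (start end_ num : Int)
    (h0 : 0 ≤ num - 1)
    (hlt : num - 1 < ((PySem.List.slice array (some (start - 1)) (some end_)).length : Int)) :
    PySem.List.pyGetD (PySem.List.sorted (PySem.List.slice array (some (start - 1)) (some end_)) (fun x => x) false) (num - 1) 0
      = qselLoop (PySem.List.slice array (some (start - 1)) (some end_)).length
          (PySem.List.slice array (some (start - 1)) (some end_)) (num - 1) := by
  set sub := PySem.List.slice array (some (start - 1)) (some end_) with hsubdef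
  have hk : ((num - 1).toNat) < sub.length := by omega
  have e1 : num - 1 = (((num - 1).toNat : Int)) := by omega
  rw [e1, PySem.List.pyGetD_natCast, qselLoop_spec sub.length sub _ (le_refl _) hk]

-- ===== VERDICT (by name: the statement is the Claim_ definition above) =====
theorem solution_spec : Claim_equal_solution := by
  intro array commands _ hpre
  unfold Spec_solution solution solution_alt
  apply PySem.List.foldl_congr_mem
  intro acc c hc
  obtain ⟨h3, h0, hlt⟩ := hpre c hc
  match c, h3 with
  | [start, end_, num], _ =>
    simp only [List.getD, List.getElem?_cons_zero, List.getElem?_cons_succ, Option.getD_some] at h0 hlt ⊢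
    simp only [List.length_cons, List.length_nil]
    rw [step_eq array start end_ num h0 hlt]
    simp
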